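-- pv_equiv track=rewrite | github.com/ALuchinsky/Fall2022_Data7300 | ttt5_funcs.py | initMasks
-- ===== SOURCE A (Python) =====
-- def initMasks(board):
--     masks = []
--     # rows
--     for I in range(len(board)):
--         masks  = masks + [[(i,j) for i in range(len(board)) for j in range(len(board[i])) if i==I]]
--     # columns
--     for J in range(len(board)):
--         masks  = masks + [[(i,j) for i in range(len(board)) for j in range(len(board[i])) if j==J]]
--     # diagonals
--     masks  = masks + [[(i,j) for i in range(len(board)) for j in range(len(board[i])) if i==j]]
--     masks  = masks + [[(i,j) for i in range(len(board)) for j in range(len(board[i])) if i==len(board)-j-1]]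
--     return masks
-- ===== SOURCE B (Python) =====
-- def initMasks(board):
--     # Directly enumerate the cells of each row/column/diagonal: O(n^2) total, no full-board rescans.
--     n = len(board)
--     masks = [[(I, j) for j in range(len(board[I]))] for I in range(n)]
--     masks += [[(i, J) for i in range(n) if J < len(board[i])] for J in range(n)]
--     masks.append([(i, i) for i in range(n) if i < len(board[i])])
--     masks.append([(i, n - 1 - i) for i in range(n) if n - 1 - i < len(board[i])])
--     return masks
-- ===== Notes on version B (the rewrite author's own statement) =====
-- stated objective: faster
-- what changed: Instead of rebuilding each mask by scanning the full board and filtering (i==I / j==J / diagonal tests), B enumerates each mask's cells directly: row I lists its own cells, column J and the two diagonals pick one cell per row with a bounds check.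
import Mathlib
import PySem

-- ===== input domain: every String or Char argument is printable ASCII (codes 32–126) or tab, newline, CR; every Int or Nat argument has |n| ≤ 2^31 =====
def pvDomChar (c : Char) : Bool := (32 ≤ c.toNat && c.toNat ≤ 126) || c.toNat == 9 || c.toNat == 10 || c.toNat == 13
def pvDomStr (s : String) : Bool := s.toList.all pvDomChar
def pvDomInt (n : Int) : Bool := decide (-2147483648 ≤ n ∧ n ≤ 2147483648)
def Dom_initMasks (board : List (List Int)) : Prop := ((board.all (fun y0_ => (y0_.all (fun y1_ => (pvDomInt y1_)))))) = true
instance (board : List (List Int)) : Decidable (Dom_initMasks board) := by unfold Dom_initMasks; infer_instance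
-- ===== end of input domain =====

-- B enumerates each row/column/diagonal's cells directly (O(n^2)) instead of rescanning the whole board per mask (O(n^3)).

-- ===== PORT A =====
-- [(i,j) for i in range(len(board)) for j in range(len(board[i])) if p i j]
def pvACell (board : List (List Int)) (p : Nat → Nat → Bool) : List (Int × Int) :=
  (List.range board.length).flatMap (fun i =>
    ((List.range (board.getD i []).length).filter (fun j => p i j)).map
      (fun (j : Nat) => ((i : Int), (j : Int))))

def initMasks (board : List (List Int)) : List (List (Int × Int)) :=
  let masks : List (List (Int × Int)) := []
  -- rows
  let masks := (List.range board.length).foldl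
    (fun acc I => acc ++ [pvACell board (fun i _ => i == I)]) masks
  -- columns
  let masks := (List.range board.length).foldl
    (fun acc J => acc ++ [pvACell board (fun _ j => j == J)]) masks
  -- diagonals
  let masks := masks ++ [pvACell board (fun i j => (i : Int) == (j : Int))]
  let masks := masks ++ [pvACell board (fun i j => (i : Int) == (board.length : Int) - (j : Int) - 1)]
  masks

-- ===== PORT B =====
def initMasks_alt (board : List (List Int)) : List (List (Int × Int)) :=
  let n := board.length
  let rows := (List.range n).map (fun (I : Nat) =>
    (List.range (board.getD I []).length).map (fun (j : Nat) => ((I : Int), (j : Int))))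
  let cols := (List.range n).map (fun (J : Nat) =>
    ((List.range n).filter (fun (i : Nat) => decide (J < (board.getD i []).length))).map
      (fun (i : Nat) => ((i : Int), (J : Int))))
  let diag := ((List.range n).filter (fun (i : Nat) => decide (i < (board.getD i []).length))).map
      (fun (i : Nat) => ((i : Int), (i : Int)))
  let anti := ((List.range n).filter (fun (i : Nat) => decide (n - 1 - i < (board.getD i []).length))).map
      (fun (i : Nat) => ((i : Int), (n : Int) - 1 - (i : Int)))
  rows ++ cols ++ [diag, anti]

-- ===== PRECONDITION & SPEC =====
def Spec_initMasks (board : List (List Int)) (out : List (List (Int × Int))) : Prop := out = initMasks_alt board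
instance (board : List (List Int)) (out : List (List (Int × Int))) : Decidable (Spec_initMasks board out) := by unfold Spec_initMasks; infer_instance

-- ===== CLAIM (what is proved, stated in full; the proofs are below) =====
def Claim_equal_initMasks : Prop := ∀ (board : List (List Int)), Dom_initMasks board → Spec_initMasks board (initMasks board)

-- ===== LEMMAS AND PROOFS =====

-- A's accumulator loop 'masks = masks + [f I]' is init ++ map f.
theorem pv_foldl_append_singleton {α β : Type} (f : α → β) :
    ∀ (l : List α) (init : List β),
      l.foldl (fun acc x => acc ++ [f x]) init = init ++ l.map f := by
  intro l
  induction l with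
  | nil => simp
  | cons x xs ih => intro init; simp [List.foldl, ih, List.append_assoc]

theorem pv_flatMap_eq_single {α : Type} (n I : Nat) (hI : I < n) (f : Nat → List α) :
    (List.range n).flatMap (fun i => if i = I then f i else []) = f I := by
  induction n with
  | zero => omega
  | succ m ih =>
    rw [List.range_succ, List.flatMap_append]
    by_cases h : I < m
    · rw [ih h]
      have : m ≠ I := by omega
      simp [this]
    · have hIm : I = m := by omega
      subst hIm
      have : (List.range I).flatMap (fun i => if i = I then f i else []) = [] := by
        rw [List.flatMap_eq_nil_iff]
        intro i hi
        have : i ≠ I := by simp at hi; omega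
        simp [this]
      simp [this]

theorem pv_flatMap_ite_singleton {α : Type} (l : List Nat) (p : Nat → Bool) (g : Nat → α) :
    l.flatMap (fun i => if p i then [g i] else []) = (l.filter p).map g := by
  induction l with
  | nil => rfl
  | cons x xs ih =>
    by_cases h : p x <;> simp [List.filter, h, ih]

theorem pv_filter_range_eq (len J : Nat) :
    (List.range len).filter (fun j => j == J) = if J < len then [J] else [] := by
  induction len with
  | zero => simp
  | succ m ih =>
    rw [List.range_succ, List.filter_append, ih]
    rcases Nat.lt_trichotomy J m with h | h | h
    · have hm : (m == J) = false := by simp; omega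
      simp [hm, h, Nat.lt_succ_of_lt h]
    · subst h
      simp
    · have hm : (m == J) = false := by simp; omega
      have h1 : ¬ J < m := by omega
      have h2 : ¬ J < m + 1 := by omega
      simp [hm, h1, h2]

theorem pv_map_ite_single {α β : Type} (g : α → β) (c : Prop) [Decidable c] (x : α) :
    (if c then [x] else ([] : List α)).map g = if c then [g x] else [] := by
  split_ifs <;> rfl

-- row mask of A = row mask of B
theorem pv_row_eq (board : List (List Int)) (I : Nat) (hI : I < board.length) :
    pvACell board (fun i _ => i == I)
      = (List.range (board.getD I []).length).map (fun (j : Nat) => ((I : Int), (j : Int))) := by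
  unfold pvACell
  have key : ∀ i, ((List.range (board.getD i []).length).filter (fun (_ : Nat) => i == I)).map
      (fun (j : Nat) => ((i : Int), (j : Int)))
      = if i = I then (List.range (board.getD i []).length).map
          (fun (j : Nat) => ((i : Int), (j : Int))) else [] := by
    intro i
    by_cases h : i = I <;> simp [h]
  rw [List.flatMap_congr (fun i _ => key i)]
  exact pv_flatMap_eq_single board.length I hI _

-- column mask of A = column mask of B
theorem pv_col_eq (board : List (List Int)) (J : Nat) :
    pvACell board (fun _ j => j == J)
      = ((List.range board.length).filter (fun (i : Nat) => decide (J < (board.getD i []).length))).map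
          (fun (i : Nat) => ((i : Int), (J : Int))) := by
  unfold pvACell
  have key : ∀ i, ((List.range (board.getD i []).length).filter (fun (j : Nat) => j == J)).map
      (fun (j : Nat) => ((i : Int), (j : Int)))
      = if decide (J < (board.getD i []).length) = true then [((i : Int), (J : Int))] else [] := by
    intro i
    rw [pv_filter_range_eq, pv_map_ite_single]
    simp
  rw [List.flatMap_congr (fun i _ => key i)]
  exact pv_flatMap_ite_singleton _ _ _

-- main diagonal
theorem pv_diag_eq (board : List (List Int)) :
    pvACell board (fun i j => (i : Int) == (j : Int))
      = ((List.range board.length).filter (fun (i : Nat) => decide (i < (board.getD i []).length))).map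
          (fun (i : Nat) => ((i : Int), (i : Int))) := by
  unfold pvACell
  have key : ∀ i, ((List.range (board.getD i []).length).filter
        (fun (j : Nat) => (i : Int) == (j : Int))).map
      (fun (j : Nat) => ((i : Int), (j : Int)))
      = if decide (i < (board.getD i []).length) = true then [((i : Int), (i : Int))] else [] := by
    intro i
    have hf : (List.range (board.getD i []).length).filter
        (fun (j : Nat) => (i : Int) == (j : Int))
        = (List.range (board.getD i []).length).filter (fun (j : Nat) => j == i) := by
      apply List.filter_congr
      intro j _
      rw [Bool.eq_iff_iff, beq_iff_eq, beq_iff_eq]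
      omega
    rw [hf, pv_filter_range_eq, pv_map_ite_single]
    by_cases h : i < (board.getD i []).length
    · rw [if_pos h, if_pos (decide_eq_true h)]
    · rw [if_neg h, if_neg (fun hd => h (of_decide_eq_true hd))]
  rw [List.flatMap_congr (fun i _ => key i)]
  exact pv_flatMap_ite_singleton _ _ _

-- anti-diagonal
theorem pv_anti_eq (board : List (List Int)) :
    pvACell board (fun i j => (i : Int) == (board.length : Int) - (j : Int) - 1)
      = ((List.range board.length).filter
          (fun (i : Nat) => decide (board.length - 1 - i < (board.getD i []).length))).map
          (fun (i : Nat) => ((i : Int), (board.length : Int) - 1 - (i : Int))) := by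
  unfold pvACell
  have key : ∀ i ∈ List.range board.length,
      ((List.range (board.getD i []).length).filter
          (fun (j : Nat) => (i : Int) == (board.length : Int) - (j : Int) - 1)).map
        (fun (j : Nat) => ((i : Int), (j : Int)))
      = if decide (board.length - 1 - i < (board.getD i []).length) = true
        then [((i : Int), (board.length : Int) - 1 - (i : Int))] else [] := by
    intro i hi
    have hin : i < board.length := List.mem_range.mp hi
    have hf : (List.range (board.getD i []).length).filter
        (fun (j : Nat) => (i : Int) == (board.length : Int) - (j : Int) - 1)
        = (List.range (board.getD i []).length).filter
            (fun (j : Nat) => j == board.length - 1 - i) := by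
      apply List.filter_congr
      intro j _
      rw [Bool.eq_iff_iff, beq_iff_eq, beq_iff_eq]
      omega
    have hcast : (((board.length - 1 - i : Nat)) : Int) = (board.length : Int) - 1 - (i : Int) := by
      omega
    rw [hf, pv_filter_range_eq, pv_map_ite_single, hcast]
    by_cases h : board.length - 1 - i < (board.getD i []).length
    · rw [if_pos h, if_pos (decide_eq_true h)]
    · rw [if_neg h, if_neg (fun hd => h (of_decide_eq_true hd))]
  rw [List.flatMap_congr key]
  exact pv_flatMap_ite_singleton _ _ _

-- ===== VERDICT (by name: the statement is the Claim_ definition above) =====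
theorem initMasks_spec : Claim_equal_initMasks := by
  intro board _
  show initMasks board = initMasks_alt board
  unfold initMasks initMasks_alt
  simp only [pv_foldl_append_singleton, List.nil_append, List.append_assoc]
  rw [List.map_congr_left (fun I hI => pv_row_eq board I (List.mem_range.mp hI)),
      List.map_congr_left (fun J _ => pv_col_eq board J),
      pv_diag_eq, pv_anti_eq]
  simp
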